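-- pv_equiv track=rewrite | github.com/ckhs09/rag------ | Query transformations/query_transformations/expand/expand_query.py | expand_with_context
-- ===== SOURCE A (Python) =====
-- def expand_with_context(query):
--     """
--     添加上下文信息扩展查询
--     """
--     context_expansions = []
--
--     # 基础扩展
--     context_expansions.append(query)
--
--     # 技术上下文扩展
--     if any(word in query.lower() for word in ["python", "java", "javascript", "react", "vue", "angular"]):
--         expanded = f"{query} programming tutorial example"
--         context_expansions.append(expanded)
--
--         expanded = f"{query} best practices"
--         context_expansions.append(expanded)
--
--         expanded = f"{query} beginner guide"
--         context_expansions.append(expanded)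
--
--     # 健康相关扩展
--     if any(word in query.lower() for word in ["health", "exercise", "diet", "nutrition", "fitness"]):
--         expanded = f"{query} benefits research study"
--         context_expansions.append(expanded)
--
--         expanded = f"{query} tips for beginners"
--         context_expansions.append(expanded)
--
--         expanded = f"{query} latest guidelines"
--         context_expansions.append(expanded)
--
--     return context_expansions
-- ===== SOURCE B (Python) =====
-- # Different mechanism: one scan over the query's positions matching every keyword by
-- # startswith (collecting the set of matched rule groups), then a staged output pass.
-- SUFFIX_GROUPS = [
--     ["programming tutorial example", "best practices", "beginner guide"],
--     ["benefits research study", "tips for beginners", "latest guidelines"],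
-- ]
-- KEYWORDS = [
--     ("python", 0), ("java", 0), ("javascript", 0), ("react", 0), ("vue", 0), ("angular", 0),
--     ("health", 1), ("exercise", 1), ("diet", 1), ("nutrition", 1), ("fitness", 1),
-- ]
--
--
-- def expand_with_context(query):
--     q = query.lower()
--     hit = {g for i in range(len(q)) for kw, g in KEYWORDS if q.startswith(kw, i)}
--     out = [query]
--     for g, suffixes in enumerate(SUFFIX_GROUPS):
--         if g in hit:
--             out += [f"{query} {s}" for s in suffixes]
--     return out
-- ===== Notes on version B (the rewrite author's own statement) =====
-- stated objective: alternative
-- what changed: Instead of per-keyword substring searches in two if-blocks, B makes a single scan over the lowered query's positions, matching every keyword by startswith to collect the set of matched rule groups, then emits the suffixes of each hit group in a staged output pass.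
import Mathlib
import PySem

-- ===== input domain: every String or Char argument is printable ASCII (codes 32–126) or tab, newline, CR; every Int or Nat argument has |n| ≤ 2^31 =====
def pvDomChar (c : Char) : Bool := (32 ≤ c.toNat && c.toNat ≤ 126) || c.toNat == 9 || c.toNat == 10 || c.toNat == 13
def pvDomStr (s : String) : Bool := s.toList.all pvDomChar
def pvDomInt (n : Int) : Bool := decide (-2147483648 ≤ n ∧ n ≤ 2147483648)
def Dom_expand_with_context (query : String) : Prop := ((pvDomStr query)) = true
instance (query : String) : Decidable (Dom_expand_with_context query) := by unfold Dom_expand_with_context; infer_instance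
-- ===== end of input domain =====

-- B replaces A's per-keyword substring searches with one scan over the query's
-- positions matching all keywords by prefix, collecting the set of hit groups
-- (objective: alternative).

-- ===== PORT A =====
def expand_with_context (query : String) : List String :=
  let context_expansions : List String := []
  let context_expansions := context_expansions ++ [query]
  let context_expansions :=
    if (["python", "java", "javascript", "react", "vue", "angular"].any
          (fun word => PySem.Str.isIn word (PySem.Str.lower query))) then
      let expanded := query ++ " programming tutorial example"
      let context_expansions := context_expansions ++ [expanded]
      let expanded := query ++ " best practices"
      let context_expansions := context_expansions ++ [expanded]
      let expanded := query ++ " beginner guide"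
      context_expansions ++ [expanded]
    else context_expansions
  let context_expansions :=
    if (["health", "exercise", "diet", "nutrition", "fitness"].any
          (fun word => PySem.Str.isIn word (PySem.Str.lower query))) then
      let expanded := query ++ " benefits research study"
      let context_expansions := context_expansions ++ [expanded]
      let expanded := query ++ " tips for beginners"
      let context_expansions := context_expansions ++ [expanded]
      let expanded := query ++ " latest guidelines"
      context_expansions ++ [expanded]
    else context_expansions
  context_expansions

-- ===== PORT B =====
def pvSuffixGroups : List (List String) :=
  [ ["programming tutorial example", "best practices", "beginner guide"],
    ["benefits research study", "tips for beginners", "latest guidelines"] ]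

def pvKeywords : List (List Char × Int) :=
  [ ("python".toList, 0), ("java".toList, 0), ("javascript".toList, 0),
    ("react".toList, 0), ("vue".toList, 0), ("angular".toList, 0),
    ("health".toList, 1), ("exercise".toList, 1), ("diet".toList, 1),
    ("nutrition".toList, 1), ("fitness".toList, 1) ]

-- the set comprehension {g for i in range(len(q)) for kw, g in KEYWORDS if q.startswith(kw, i)}
-- (q.startswith(kw, i) with 0 ≤ i ≤ len(q) is exactly kw.isPrefixOf (q.drop i))
def pvHits (q : List Char) : PySem.Set Int :=
  (List.range q.length).foldl
    (fun h i =>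
      pvKeywords.foldl
        (fun h' kg => if kg.1.isPrefixOf (q.drop i) then PySem.Set.add h' kg.2 else h') h)
    PySem.Set.empty

def expand_with_context_alt (query : String) : List String :=
  let hit := pvHits (PySem.Str.lower query).toList
  (PySem.List.enumerate pvSuffixGroups).foldl
    (fun out gs =>
      if PySem.Set.contains hit gs.1 then
        out ++ gs.2.map (fun s => query ++ " " ++ s)
      else out)
    [query]

-- ===== PRECONDITION & SPEC =====
def Spec_expand_with_context (query : String) (out : List String) : Prop := out = expand_with_context_alt query
instance (query : String) (out : List String) : Decidable (Spec_expand_with_context query out) := by unfold Spec_expand_with_context; infer_instance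

-- ===== CLAIM =====
def Claim_equal_expand_with_context : Prop := ∀ (query : String), Dom_expand_with_context query → Spec_expand_with_context query (expand_with_context query)

-- ===== LEMMAS AND PROOFS =====

-- membership in the inner keyword fold
theorem mem_kw_foldl (q : List Char) (i : Nat) (h : PySem.Set Int) (l : List (List Char × Int)) (g : Int) :
    g ∈ l.foldl (fun h' kg => if kg.1.isPrefixOf (q.drop i) then PySem.Set.add h' kg.2 else h') h ↔
      g ∈ h ∨ ∃ kg ∈ l, kg.1 <+: q.drop i ∧ kg.2 = g := by
  induction l generalizing h with
  | nil => simp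
  | cons kg l ih =>
    simp only [List.foldl_cons]
    by_cases hp : kg.1 <+: q.drop i
    · rw [if_pos (List.isPrefixOf_iff_prefix.mpr hp), ih]
      simp only [PySem.Set.mem_add, List.mem_cons]
      constructor
      · rintro (⟨hm | rfl⟩ | ⟨kg', hm, hrest⟩)
        · exact Or.inl hm
        · exact Or.inr ⟨kg, Or.inl rfl, hp, rfl⟩
        · exact Or.inr ⟨kg', Or.inr hm, hrest⟩
      · rintro (hm | ⟨kg', hm | hm, hrest⟩)
        · exact Or.inl (Or.inl hm)
        · subst hm; exact Or.inl (Or.inr hrest.2.symm)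
        · exact Or.inr ⟨kg', hm, hrest⟩
    · rw [if_neg (fun hb => hp (List.isPrefixOf_iff_prefix.mp hb)), ih]
      constructor
      · rintro (hm | ⟨kg', hm, hrest⟩)
        · exact Or.inl hm
        · exact Or.inr ⟨kg', List.mem_cons_of_mem _ hm, hrest⟩
      · rintro (hm | ⟨kg', hm, hrest⟩)
        · exact Or.inl hm
        · rcases List.mem_cons.mp hm with rfl | hm
          · exact absurd hrest.1 hp
          · exact Or.inr ⟨kg', hm, hrest⟩

theorem mem_pvHits (q : List Char) (g : Int) :
    g ∈ pvHits q ↔ ∃ i < q.length, ∃ kg ∈ pvKeywords, kg.1 <+: q.drop i ∧ kg.2 = g := by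
  unfold pvHits
  have main : ∀ n : Nat,
      g ∈ (List.range n).foldl
        (fun h i => pvKeywords.foldl
          (fun h' kg => if kg.1.isPrefixOf (q.drop i) then PySem.Set.add h' kg.2 else h') h)
        PySem.Set.empty ↔
      ∃ i < n, ∃ kg ∈ pvKeywords, kg.1 <+: q.drop i ∧ kg.2 = g := by
    intro n
    induction n with
    | zero => simp [PySem.Set.empty]
    | succ n ih =>
      rw [List.range_succ, List.foldl_append, List.foldl_cons, List.foldl_nil,
        mem_kw_foldl, ih]
      constructor
      · rintro (⟨i, hi, hrest⟩ | hrest)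
        · exact ⟨i, Nat.lt_succ_of_lt hi, hrest⟩
        · exact ⟨n, Nat.lt_succ_self n, hrest⟩
      · rintro ⟨i, hi, hrest⟩
        rcases Nat.lt_succ_iff_lt_or_eq.mp hi with hlt | rfl
        · exact Or.inl ⟨i, hlt, hrest⟩
        · exact Or.inr hrest
  exact main q.length

-- a nonempty keyword is a prefix of some tail of q at a position < len iff it occurs in q
theorem exists_prefix_iff_infix (kw q : List Char) (hne : kw ≠ []) :
    (∃ i < q.length, kw <+: q.drop i) ↔ kw <:+: q := by
  constructor
  · rintro ⟨i, _, hp⟩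
    exact hp.isInfix.trans (List.drop_suffix i q).isInfix
  · intro hinf
    have h1 : PySem.Chars.isIn kw q = true := (PySem.Chars.isIn_iff_infix kw q).mpr hinf
    obtain ⟨j, hj⟩ := (PySem.Chars.exists_prefix_drop_iff_isIn kw q).mpr h1
    by_cases hjl : j < q.length
    · exact ⟨j, hjl, hj⟩
    · exfalso
      have : q.drop j = [] := List.drop_eq_nil_of_le (Nat.le_of_not_lt hjl)
      rw [this] at hj
      exact hne (List.prefix_nil.mp hj)

theorem hit_iff (q : List Char) (g : Int) :
    g ∈ pvHits q ↔ ∃ kg ∈ pvKeywords, kg.2 = g ∧ PySem.Chars.isIn kg.1 q = true := by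
  rw [mem_pvHits]
  constructor
  · rintro ⟨i, hi, kg, hmem, hp, hg⟩
    refine ⟨kg, hmem, hg, (PySem.Chars.isIn_iff_infix _ _).mpr ?_⟩
    have hne : kg.1 ≠ [] := by
      simp only [pvKeywords, List.mem_cons, List.not_mem_nil, or_false] at hmem
      rcases hmem with rfl|rfl|rfl|rfl|rfl|rfl|rfl|rfl|rfl|rfl|rfl <;> simp
    exact (exists_prefix_iff_infix kg.1 q hne).mp ⟨i, hi, hp⟩
  · rintro ⟨kg, hmem, hg, hin⟩
    have hne : kg.1 ≠ [] := by
      simp only [pvKeywords, List.mem_cons, List.not_mem_nil, or_false] at hmem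
      rcases hmem with rfl|rfl|rfl|rfl|rfl|rfl|rfl|rfl|rfl|rfl|rfl <;> simp
    obtain ⟨i, hi, hp⟩ :=
      (exists_prefix_iff_infix kg.1 q hne).mpr ((PySem.Chars.isIn_iff_infix _ _).mp hin)
    exact ⟨i, hi, kg, hmem, hp, hg⟩

-- group 0 hit ⟺ A's tech condition; group 1 hit ⟺ A's health condition
theorem hit0_iff (query : String) :
    (0 : Int) ∈ pvHits (PySem.Str.lower query).toList ↔
      (["python", "java", "javascript", "react", "vue", "angular"].any
        (fun word => PySem.Str.isIn word (PySem.Str.lower query))) = true := by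
  rw [hit_iff]
  simp only [pvKeywords, List.mem_cons, List.not_mem_nil, or_false, List.any_eq_true,
    PySem.Str.isIn_iff_infix]
  constructor
  · rintro ⟨kg, hmem, hg, hin⟩
    rw [PySem.Chars.isIn_iff_infix] at hin
    rcases hmem with rfl|rfl|rfl|rfl|rfl|rfl|rfl|rfl|rfl|rfl|rfl
    · exact ⟨"python", by simp, hin⟩
    · exact ⟨"java", by simp, hin⟩
    · exact ⟨"javascript", by simp, hin⟩
    · exact ⟨"react", by simp, hin⟩
    · exact ⟨"vue", by simp, hin⟩
    · exact ⟨"angular", by simp, hin⟩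
    · exact absurd hg (by norm_num)
    · exact absurd hg (by norm_num)
    · exact absurd hg (by norm_num)
    · exact absurd hg (by norm_num)
    · exact absurd hg (by norm_num)
  · rintro ⟨w, hw, hin⟩
    rcases hw with rfl|rfl|rfl|rfl|rfl|rfl
    · exact ⟨("python".toList, 0), by simp, rfl, (PySem.Chars.isIn_iff_infix _ _).mpr hin⟩
    · exact ⟨("java".toList, 0), by simp, rfl, (PySem.Chars.isIn_iff_infix _ _).mpr hin⟩
    · exact ⟨("javascript".toList, 0), by simp, rfl, (PySem.Chars.isIn_iff_infix _ _).mpr hin⟩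
    · exact ⟨("react".toList, 0), by simp, rfl, (PySem.Chars.isIn_iff_infix _ _).mpr hin⟩
    · exact ⟨("vue".toList, 0), by simp, rfl, (PySem.Chars.isIn_iff_infix _ _).mpr hin⟩
    · exact ⟨("angular".toList, 0), by simp, rfl, (PySem.Chars.isIn_iff_infix _ _).mpr hin⟩

theorem hit1_iff (query : String) :
    (1 : Int) ∈ pvHits (PySem.Str.lower query).toList ↔
      (["health", "exercise", "diet", "nutrition", "fitness"].any
        (fun word => PySem.Str.isIn word (PySem.Str.lower query))) = true := by
  rw [hit_iff]
  simp only [pvKeywords, List.mem_cons, List.not_mem_nil, or_false, List.any_eq_true,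
    PySem.Str.isIn_iff_infix]
  constructor
  · rintro ⟨kg, hmem, hg, hin⟩
    rw [PySem.Chars.isIn_iff_infix] at hin
    rcases hmem with rfl|rfl|rfl|rfl|rfl|rfl|rfl|rfl|rfl|rfl|rfl
    · exact absurd hg (by norm_num)
    · exact absurd hg (by norm_num)
    · exact absurd hg (by norm_num)
    · exact absurd hg (by norm_num)
    · exact absurd hg (by norm_num)
    · exact absurd hg (by norm_num)
    · exact ⟨"health", by simp, hin⟩
    · exact ⟨"exercise", by simp, hin⟩
    · exact ⟨"diet", by simp, hin⟩
    · exact ⟨"nutrition", by simp, hin⟩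
    · exact ⟨"fitness", by simp, hin⟩
  · rintro ⟨w, hw, hin⟩
    rcases hw with rfl|rfl|rfl|rfl|rfl
    · exact ⟨("health".toList, 1), by simp, rfl, (PySem.Chars.isIn_iff_infix _ _).mpr hin⟩
    · exact ⟨("exercise".toList, 1), by simp, rfl, (PySem.Chars.isIn_iff_infix _ _).mpr hin⟩
    · exact ⟨("diet".toList, 1), by simp, rfl, (PySem.Chars.isIn_iff_infix _ _).mpr hin⟩
    · exact ⟨("nutrition".toList, 1), by simp, rfl, (PySem.Chars.isIn_iff_infix _ _).mpr hin⟩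
    · exact ⟨("fitness".toList, 1), by simp, rfl, (PySem.Chars.isIn_iff_infix _ _).mpr hin⟩

-- ===== VERDICT =====
theorem expand_with_context_spec : Claim_equal_expand_with_context := by
  intro query _
  unfold Spec_expand_with_context expand_with_context expand_with_context_alt
  simp only [pvSuffixGroups, PySem.List.enumerate_cons, PySem.List.enumerate_nil,
    List.foldl_cons, List.foldl_nil, List.nil_append, List.map_cons, List.map_nil, zero_add]
  by_cases h0 : (["python", "java", "javascript", "react", "vue", "angular"].any
      (fun word => PySem.Str.isIn word (PySem.Str.lower query))) = true <;>
  by_cases h1 : (["health", "exercise", "diet", "nutrition", "fitness"].any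
      (fun word => PySem.Str.isIn word (PySem.Str.lower query))) = true
  case pos =>
    have c0 := (PySem.Set.contains_iff (pvHits (PySem.Str.lower query).toList) 0).mpr
      ((hit0_iff query).mpr h0)
    have c1 := (PySem.Set.contains_iff (pvHits (PySem.Str.lower query).toList) 1).mpr
      ((hit1_iff query).mpr h1)
    rw [if_pos h0, if_pos h1, if_pos c0, if_pos c1]
    simp [String.append_assoc]
  case neg =>
    have c0 := (PySem.Set.contains_iff (pvHits (PySem.Str.lower query).toList) 0).mpr
      ((hit0_iff query).mpr h0)
    have c1 : PySem.Set.contains (pvHits (PySem.Str.lower query).toList) 1 = true → False :=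
      fun hc => h1 ((hit1_iff query).mp ((PySem.Set.contains_iff _ _).mp hc))
    rw [if_pos h0, if_neg h1, if_pos c0, if_neg c1]
    simp [String.append_assoc]
  case pos =>
    have c0 : PySem.Set.contains (pvHits (PySem.Str.lower query).toList) 0 = true → False :=
      fun hc => h0 ((hit0_iff query).mp ((PySem.Set.contains_iff _ _).mp hc))
    have c1 := (PySem.Set.contains_iff (pvHits (PySem.Str.lower query).toList) 1).mpr
      ((hit1_iff query).mpr h1)
    rw [if_neg h0, if_pos h1, if_neg c0, if_pos c1]
    simp [String.append_assoc]
  case neg =>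
    have c0 : PySem.Set.contains (pvHits (PySem.Str.lower query).toList) 0 = true → False :=
      fun hc => h0 ((hit0_iff query).mp ((PySem.Set.contains_iff _ _).mp hc))
    have c1 : PySem.Set.contains (pvHits (PySem.Str.lower query).toList) 1 = true → False :=
      fun hc => h1 ((hit1_iff query).mp ((PySem.Set.contains_iff _ _).mp hc))
    rw [if_neg h0, if_neg h1, if_neg c0, if_neg c1]
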